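-- pv_equiv track=rewrite | github.com/Arin0421/Algorithm | String/옹알이.py | solution
-- ===== SOURCE A (Python) =====
-- def solution(babbling):
--     answer = 0
--     arr=["aya","ye","woo","ma"]
--
--     for baby in babbling:
--         cnt=0
--         word=''
--         for i in baby:
--             word+=i
--             if word in arr:
--                 word=''
--                 cnt+=1
--         if len(word)==0 and cnt>0:
--             answer+=1
--
--     return answer
-- ===== SOURCE B (Python) =====
-- def _match(s):
--     # True iff s is a (possibly empty) concatenation of allowed syllables
--     if not s:
--         return True
--     for t in ("aya", "ye", "woo", "ma"):
--         if s.startswith(t) and _match(s[len(t):]):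
--             return True
--     return False
--
--
-- def solution(babbling):
--     return sum(1 for baby in babbling if baby and _match(baby))
-- ===== Notes on version B (the rewrite author's own statement) =====
-- stated objective: idiomatic
-- what changed: Replaces A's character-by-character buffer accumulation and membership reset with a direct recursive token-peeling parser (startswith on each syllable) plus a sum comprehension.
import Mathlib
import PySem

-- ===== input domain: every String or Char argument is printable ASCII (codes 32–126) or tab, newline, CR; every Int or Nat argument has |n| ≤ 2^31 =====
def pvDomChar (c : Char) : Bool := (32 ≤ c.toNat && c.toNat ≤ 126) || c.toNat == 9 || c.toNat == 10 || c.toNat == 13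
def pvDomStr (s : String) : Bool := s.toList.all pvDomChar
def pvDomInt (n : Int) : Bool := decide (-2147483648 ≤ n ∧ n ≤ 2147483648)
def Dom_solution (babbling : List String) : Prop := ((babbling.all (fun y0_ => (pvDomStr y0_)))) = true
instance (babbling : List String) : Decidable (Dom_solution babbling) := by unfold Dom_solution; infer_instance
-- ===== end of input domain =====

-- B replaces A's char-by-char buffer/reset scan with a recursive syllable-peeling parser; objective: idiomatic.

-- ===== PORT A =====
-- the allowed-syllable list (Python strings ported as List Char per the Str/Chars convention)
def arrA : List (List Char) := [['a','y','a'], ['y','e'], ['w','o','o'], ['m','a']]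

-- the body of A's inner 'for i in baby' loop: state (cnt, word)
def stepA (st : Int × List Char) (i : Char) : Int × List Char :=
  let word := st.2 ++ [i]
  if word ∈ arrA then (st.1 + 1, []) else (st.1, word)

def solution (babbling : List String) : Int :=
  babbling.foldl (fun answer baby =>
    let st := baby.toList.foldl stepA (0, ([] : List Char))
    if st.2.length = 0 ∧ 0 < st.1 then answer + 1 else answer) 0

-- ===== PORT B =====
-- B's _match: peel one allowed syllable off the front and recurse (s.startswith(t) → isPrefixOf)
def bMatch (s : List Char) : Bool :=
  if s.isEmpty then true
  else
    (if _h1 : List.isPrefixOf ['a','y','a'] s then bMatch (s.drop 3) else false) ||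
    (if _h2 : List.isPrefixOf ['y','e'] s then bMatch (s.drop 2) else false) ||
    (if _h3 : List.isPrefixOf ['w','o','o'] s then bMatch (s.drop 3) else false) ||
    (if _h4 : List.isPrefixOf ['m','a'] s then bMatch (s.drop 2) else false)
termination_by s.length
decreasing_by
  all_goals
    simp only [List.isPrefixOf_iff_prefix] at *
    first
      | (have := _h1.length_le; simp at this ⊢; omega)
      | (have := _h2.length_le; simp at this ⊢; omega)
      | (have := _h3.length_le; simp at this ⊢; omega)
      | (have := _h4.length_le; simp at this ⊢; omega)

def solution_alt (babbling : List String) : Int :=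
  babbling.foldl (fun acc baby =>
    if !baby.toList.isEmpty && bMatch baby.toList then acc + 1 else acc) 0

-- ===== PRECONDITION & SPEC =====
def Spec_solution (babbling : List String) (out : Int) : Prop := out = solution_alt babbling
instance (babbling : List String) (out : Int) : Decidable (Spec_solution babbling out) := by unfold Spec_solution; infer_instance

-- ===== CLAIM (what is proved, stated in full; the proofs are below) =====
def Claim_equal_solution : Prop := ∀ (babbling : List String), Dom_solution babbling → Spec_solution babbling (solution babbling)

-- ===== LEMMAS AND PROOFS =====

-- the 'word' component of A's inner loop, isolated from the counter
def loopW : List Char → List Char → List Char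
  | w, [] => w
  | w, c :: rest =>
    if w ++ [c] ∈ arrA then loopW [] rest else loopW (w ++ [c]) rest

lemma foldA_snd (l : List Char) : ∀ (c : Int) (w : List Char),
    (List.foldl stepA (c, w) l).2 = loopW w l := by
  induction l with
  | nil => intro c w; simp [loopW]
  | cons x rest ih =>
    intro c w
    simp only [List.foldl_cons, stepA, loopW]
    split <;> simp_all

lemma foldA_mono (l : List Char) : ∀ (c : Int) (w : List Char),
    c ≤ (List.foldl stepA (c, w) l).1 := by
  induction l with
  | nil => intro c w; simp
  | cons x rest ih =>
    intro c w
    simp only [List.foldl_cons, stepA]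
    split
    · exact le_trans (by omega) (ih (c + 1) [])
    · exact ih c _

lemma foldA_pos (l : List Char) : ∀ (c : Int) (w : List Char), w ≠ [] ∨ l ≠ [] →
    (List.foldl stepA (c, w) l).2 = [] → c < (List.foldl stepA (c, w) l).1 := by
  induction l with
  | nil =>
    intro c w h h2
    simp at h2
    rcases h with h | h
    · exact absurd h2 h
    · exact absurd rfl h
  | cons x rest ih =>
    intro c w _ h2
    simp only [List.foldl_cons, stepA] at *
    split at h2 <;> rename_i hm
    · simp only [hm, if_pos] at *
      exact lt_of_lt_of_le (by omega) (foldA_mono rest (c + 1) [])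
    · simp only [hm, if_false] at *
      exact ih c (w ++ [x]) (Or.inl (by simp)) h2

lemma prefix_free : ∀ t1 ∈ arrA, ∀ t2 ∈ arrA, t1 <+: t2 → t1 = t2 := by decide

-- once the buffer is not a prefix of any syllable, A's inner loop never resets it
lemma loopW_noReset (l : List Char) : ∀ w, (∀ t ∈ arrA, ¬ w <+: t) → w ≠ [] →
    loopW w l ≠ [] := by
  induction l with
  | nil => intro w h hne; simpa [loopW] using hne
  | cons c rest ih =>
    intro w h hne
    have hpre : w <+: w ++ [c] := ⟨[c], rfl⟩
    simp only [loopW]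
    rw [if_neg (fun hmem => h _ hmem hpre)]
    exact ih (w ++ [c]) (fun t ht hp => h t ht (hpre.trans hp)) (by simp)

def InvW (w : List Char) : Prop := ∃ t ∈ arrA, w <+: t ∧ w ≠ t

lemma inv_not_mem {w : List Char} (hw : InvW w) : w ∉ arrA := by
  rintro hmem
  obtain ⟨t, ht, hpre, hne⟩ := hw
  exact hne (prefix_free w hmem t ht hpre)

-- the characterisation of A's inner loop as a syllable-peeling parse
lemma loopW_char (l : List Char) : ∀ w, InvW w →
    (loopW w l = [] ↔ (w = [] ∧ l = []) ∨
      ∃ u v, l = u ++ v ∧ (w ++ u) ∈ arrA ∧ loopW [] v = []) := by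
  induction l with
  | nil =>
    intro w hw
    simp only [loopW]
    constructor
    · rintro rfl; simp
    · rintro (⟨rfl, -⟩ | ⟨u, v, huv, hmem, -⟩)
      · rfl
      · have hu : u = [] := by
          cases u with
          | nil => rfl
          | cons a b => simp at huv
        have hv : ([] : List Char) = v := by simpa [hu] using huv
        subst hu
        simp at hmem
        exact absurd hmem (inv_not_mem hw)
  | cons c rest ih =>
    intro w hw
    simp only [loopW]
    by_cases hm : w ++ [c] ∈ arrA
    · rw [if_pos hm]
      constructor
      · intro hrec
        exact Or.inr ⟨[c], rest, rfl, hm, hrec⟩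
      · rintro (⟨-, h⟩ | ⟨u, v, huv, hmem, hv⟩)
        · simp at h
        · cases u with
          | nil =>
            simp at huv hmem
            exact absurd hmem (inv_not_mem hw)
          | cons a u' =>
            have hac : a = c ∧ rest = u' ++ v := by
              constructor <;> simp_all
            obtain ⟨rfl, hrest⟩ := hac
            have hpre : w ++ [a] <+: w ++ (a :: u') := ⟨u', by simp⟩
            have := prefix_free _ hm _ hmem hpre
            have hu' : u' = [] := by
              have h9 := List.append_cancel_left this
              simpa using h9.symm
            subst hu'
            simp at hrest
            rwa [hrest]
    · rw [if_neg hm]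
      by_cases hinv : InvW (w ++ [c])
      · rw [ih (w ++ [c]) hinv]
        constructor
        · rintro (⟨h, -⟩ | ⟨u, v, huv, hmem, hv⟩)
          · simp at h
          · exact Or.inr ⟨c :: u, v, by simp [huv], by simpa using hmem, hv⟩
        · rintro (⟨-, h⟩ | ⟨u, v, huv, hmem, hv⟩)
          · simp at h
          · cases u with
            | nil =>
              simp at huv hmem
              exact absurd hmem (inv_not_mem hw)
            | cons a u' =>
              have hac : a = c ∧ rest = u' ++ v := by
                constructor <;> simp_all
              obtain ⟨rfl, hrest⟩ := hac
              exact Or.inr ⟨u', v, hrest, by simpa using hmem, hv⟩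
      · have hnp : ∀ t ∈ arrA, ¬ (w ++ [c]) <+: t := by
          intro t ht hp
          by_cases he : w ++ [c] = t
          · exact hm (he ▸ ht)
          · exact hinv ⟨t, ht, hp, he⟩
        have hnr := loopW_noReset rest (w ++ [c]) hnp (by simp)
        constructor
        · intro h; exact absurd h hnr
        · rintro (⟨-, h⟩ | ⟨u, v, huv, hmem, -⟩)
          · simp at h
          · cases u with
            | nil =>
              simp at huv hmem
              exact absurd hmem (inv_not_mem hw)
            | cons a u' =>
              have hac : a = c := by simp_all
              subst hac
              have hpre : w ++ [a] <+: w ++ (a :: u') := ⟨u', by simp⟩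
              exact absurd hpre (hnp _ hmem)

lemma inv_nil : InvW ([] : List Char) := ⟨['m','a'], by decide, by simp, by simp⟩

lemma dite_false_elim {P : Prop} [inst : Decidable P] {b : Bool}
    (h : (if _ : P then b else false) = true) : P ∧ b = true := by
  by_cases hp : P
  · exact ⟨hp, by simpa [hp] using h⟩
  · simp [hp] at h

-- A's inner parse from the empty buffer agrees with B's bMatch
lemma loopW_eq_bMatch : ∀ (n : Nat) (l : List Char), l.length ≤ n →
    (loopW [] l = [] ↔ bMatch l = true) := by
  intro n
  induction n with
  | zero =>
    intro l hl
    have : l = [] := by cases l <;> simp_all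
    subst this
    simp [loopW, bMatch]
  | succ n ih =>
    intro l hl
    cases l with
    | nil => simp [loopW, bMatch]
    | cons c rest =>
      rw [loopW_char (c :: rest) [] inv_nil]
      rw [bMatch]
      simp only [List.isEmpty_cons, Bool.false_eq_true, if_false, Bool.or_eq_true]
      constructor
      · rintro (⟨-, h⟩ | ⟨u, v, huv, hmem, hv⟩)
        · simp at h
        · have hulen : 2 ≤ u.length := by
            fin_cases hmem <;> simp
          have hvlen : v.length ≤ n := by
            have : (c :: rest).length = u.length + v.length := by simp [huv]
            simp at this hl; omega
          have hb : bMatch v = true := (ih v hvlen).mp hv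
          have hpre : List.isPrefixOf u (c :: rest) = true := by
            rw [List.isPrefixOf_iff_prefix]; exact ⟨v, huv.symm⟩
          have hdrop : (c :: rest).drop u.length = v := by
            rw [huv, List.drop_left]
          fin_cases hmem <;> simp only [List.length_cons, List.length_nil] at hdrop <;>
            simp [hpre, hdrop, hb]
      · intro h
        have key : ∃ u, u ∈ arrA ∧ List.isPrefixOf u (c :: rest) = true ∧
            bMatch ((c :: rest).drop u.length) = true := by
          rcases h with ((h | h) | h) | h
          · exact ⟨['a','y','a'], by decide, (dite_false_elim h).1, by simpa using (dite_false_elim h).2⟩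
          · exact ⟨['y','e'], by decide, (dite_false_elim h).1, by simpa using (dite_false_elim h).2⟩
          · exact ⟨['w','o','o'], by decide, (dite_false_elim h).1, by simpa using (dite_false_elim h).2⟩
          · exact ⟨['m','a'], by decide, (dite_false_elim h).1, by simpa using (dite_false_elim h).2⟩
        obtain ⟨u, hmem, hpre, hb⟩ := key
        rw [List.isPrefixOf_iff_prefix] at hpre
        obtain ⟨v, hv⟩ := hpre
        have hdrop : (c :: rest).drop u.length = v := by
          rw [← hv, List.drop_left]
        have hulen : 2 ≤ u.length := by fin_cases hmem <;> simp
        have hvlen : v.length ≤ n := by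
          have : (c :: rest).length = u.length + v.length := by simp [← hv]
          simp at this hl; omega
        refine Or.inr ⟨u, v, hv.symm, by simpa using hmem, ?_⟩
        exact (ih v hvlen).mpr (hdrop ▸ hb)

-- A's per-string acceptance condition equals B's
lemma cond_eq (l : List Char) :
    ((List.foldl stepA (0, ([] : List Char)) l).2.length = 0 ∧
      0 < (List.foldl stepA (0, ([] : List Char)) l).1) ↔
    (!l.isEmpty && bMatch l) = true := by
  constructor
  · rintro ⟨hw, hc⟩
    rw [List.length_eq_zero_iff, foldA_snd] at hw
    have hlne : l ≠ [] := by
      rintro rfl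
      simp [loopW] at hw
      simp [List.foldl] at hc
    simp only [Bool.and_eq_true, Bool.not_eq_eq_eq_not, Bool.not_true]
    exact ⟨by simp [hlne], (loopW_eq_bMatch l.length l le_rfl).mp hw⟩
  · intro h
    simp only [Bool.and_eq_true] at h
    obtain ⟨hne, hb⟩ := h
    have hlne : l ≠ [] := by simpa [List.isEmpty_iff] using hne
    have hw : loopW [] l = [] := (loopW_eq_bMatch l.length l le_rfl).mpr hb
    have hw2 : (List.foldl stepA (0, ([] : List Char)) l).2 = [] := by
      rw [foldA_snd]; exact hw
    refine ⟨by simp [hw2], ?_⟩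
    exact foldA_pos l 0 [] (Or.inr hlne) hw2

lemma fold_eq (bs : List String) : ∀ (a : Int),
    bs.foldl (fun answer baby =>
      let st := baby.toList.foldl stepA (0, ([] : List Char))
      if st.2.length = 0 ∧ 0 < st.1 then answer + 1 else answer) a =
    bs.foldl (fun acc baby =>
      if !baby.toList.isEmpty && bMatch baby.toList then acc + 1 else acc) a := by
  induction bs with
  | nil => intro a; rfl
  | cons b rest ih =>
    intro a
    simp only [List.foldl_cons]
    rw [if_congr (cond_eq b.toList) rfl rfl]
    exact ih _

-- ===== VERDICT (by name: the statement is the Claim_ definition above) =====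
theorem solution_spec : Claim_equal_solution := by
  intro babbling _
  unfold Spec_solution solution solution_alt
  exact fold_eq babbling 0
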